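-- pv_equiv track=rewrite | github.com/saulrh/advent-of-code-2020-py | advent_of_code_2020_py/problem06.py | ParseFilePart2
-- ===== SOURCE A (Python) =====
-- from typing import Iterable, Set
--
-- def ParseFilePart2(lines: Iterable[str]) -> Iterable[Set[str]]:
--     working = None
--     for line in lines:
--         line = line.strip()
--         if not line:
--             yield working or set()
--             working = None
--         elif working is None:
--             working = set(line)
--         else:
--             working &= set(line)
--     yield working or set()
-- ===== SOURCE B (Python) =====
-- from typing import Iterable, Set
--
--
-- def ParseFilePart2(lines: Iterable[str]) -> Iterable[Set[str]]:
--     # Count-then-threshold tally instead of a running set intersection: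
--     # per group, count in how many lines each letter occurs; a letter is in
--     # everyone's answers iff its count equals the number of lines in the group.
--     counts = {}
--     n = 0
--     for line in lines:
--         line = line.strip()
--         if not line:
--             yield {ch for ch, c in counts.items() if c == n}
--             counts = {}
--             n = 0
--         else:
--             n += 1
--             for ch in dict.fromkeys(line):
--                 counts[ch] = counts.get(ch, 0) + 1
--     yield {ch for ch, c in counts.items() if c == n}
-- ===== Notes on version B (the rewrite author's own statement) =====
-- stated objective: alternative
-- what changed: Replaces the running set-intersection fold over an Optional working set with a count-then-threshold tally: a dict counts in how many lines of the group each letter occurs, and at each yield the letters whose count equals the group's line count are emitted.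
import Mathlib
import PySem

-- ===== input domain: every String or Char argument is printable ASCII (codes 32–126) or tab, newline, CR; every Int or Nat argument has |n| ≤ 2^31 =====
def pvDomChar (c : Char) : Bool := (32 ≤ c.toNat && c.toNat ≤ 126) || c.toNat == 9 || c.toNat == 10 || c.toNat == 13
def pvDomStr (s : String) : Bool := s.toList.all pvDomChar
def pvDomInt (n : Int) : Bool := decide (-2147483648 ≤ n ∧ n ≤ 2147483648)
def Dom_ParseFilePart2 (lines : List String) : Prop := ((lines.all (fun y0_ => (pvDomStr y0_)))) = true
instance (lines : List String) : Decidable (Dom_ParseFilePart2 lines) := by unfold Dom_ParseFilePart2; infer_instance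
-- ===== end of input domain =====

-- B replaces A's running set-intersection fold with a per-group count-then-threshold
-- tally (a dict of letter counts plus a line count); same line-by-line grouping, same
-- yielded sets. Objective: alternative. Both functions are generators; the equivalence
-- is about the sequence of yielded values.


-- set(line) / dict.fromkeys(line) iterate the characters of a string as 1-char strings
def pvChars (s : String) : List String := s.toList.map (fun c => String.ofList [c])

-- ===== PORT A =====
-- loop state: (working : Optional[set], yields so far); 'working or set()' = getD []
-- ('set() or set()' is also set() = [], so getD [] is exact on an empty working set)
def pvStepA (st : Option (PySem.Set String) × List (List String)) (line : String) :
    Option (PySem.Set String) × List (List String) :=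
  let s := PySem.Str.strip line
  if s = "" then (none, st.2 ++ [st.1.getD []])
  else
    match st.1 with
    | none => (some (PySem.Set.ofList (pvChars s)), st.2)
    | some w => (some (PySem.Set.inter w (PySem.Set.ofList (pvChars s))), st.2)

def ParseFilePart2 (lines : List String) : List (List String) :=
  let st := lines.foldl pvStepA (none, [])
  st.2 ++ [st.1.getD []]

-- ===== PORT B =====
-- {ch for ch, c in counts.items() if c == n}: the set of keys of counts whose count
-- is n; counts has nodup keys, so the filtered key list is that set.
def pvEmitB (cnt : PySem.Dict String Int) (n : Int) : List String :=
  (cnt.items.filter (fun p => p.2 = n)).map (fun p => p.1)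

-- dict.fromkeys(line) = first occurrences in order = PySem.List.dedup
def pvStepB (st : PySem.Dict String Int × Int × List (List String)) (line : String) :
    PySem.Dict String Int × Int × List (List String) :=
  let s := PySem.Str.strip line
  if s = "" then (PySem.Dict.empty, 0, st.2.2 ++ [pvEmitB st.1 st.2.1])
  else ((PySem.List.dedup (pvChars s)).foldl (fun d c => d.modify c 0 (· + 1)) st.1,
        st.2.1 + 1, st.2.2)

def ParseFilePart2_alt (lines : List String) : List (List String) :=
  let st := lines.foldl pvStepB (PySem.Dict.empty, 0, [])
  st.2.2 ++ [pvEmitB st.1 st.2.1]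

-- ===== PRECONDITION & SPEC =====
def Spec_ParseFilePart2 (lines : List String) (out : List (List String)) : Prop := out = ParseFilePart2_alt lines
instance (lines : List String) (out : List (List String)) : Decidable (Spec_ParseFilePart2 lines out) := by unfold Spec_ParseFilePart2; infer_instance

-- ===== CLAIM (what is proved, stated in full; the proofs are below) =====
def Claim_equal_ParseFilePart2 : Prop := ∀ (lines : List String), Dom_ParseFilePart2 lines → Spec_ParseFilePart2 lines (ParseFilePart2 lines)

-- ===== LEMMAS AND PROOFS =====

-- coupling invariant between A's working set and B's (counter, line count)
def pvInv (w : Option (PySem.Set String)) (cnt : PySem.Dict String Int) (n : Int) : Prop :=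
  cnt.keys.Nodup ∧ (∀ p ∈ cnt.items, 1 ≤ p.2 ∧ p.2 ≤ n) ∧
  (match w with
   | none => n = 0 ∧ cnt = PySem.Dict.empty
   | some w' => 1 ≤ n ∧ w' = pvEmitB cnt n)

-- the items of B's counting loop over a duplicate-free line: old entries incremented
-- where their key occurs in the line, new keys appended with count 1

lemma items_countFold (S : List String) :
    ∀ (d : PySem.Dict String Int), S.Nodup → d.keys.Nodup →
    (S.foldl (fun d c => d.modify c 0 (· + 1)) d).items =
      d.items.map (fun p => if p.1 ∈ S then (p.1, p.2 + 1) else p)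
      ++ (S.filter (fun k => !d.contains k)).map (fun k => (k, (1 : Int))) := by
  induction S with
  | nil => intro d _ _; simp
  | cons x S ih =>
    intro d hS hd
    obtain ⟨hx, hS'⟩ := List.nodup_cons.mp hS
    have hd1 : (d.modify x 0 (· + 1)).keys.Nodup := by
      simp only [PySem.Dict.modify]; exact PySem.Dict.nodup_keys_insert d _ _ hd
    simp only [List.foldl_cons]
    rw [ih _ hS' hd1]
    by_cases hc : d.contains x = true
    · have hitems : (d.modify x 0 (· + 1)).items
          = d.items.map (fun p => if p.1 == x then (x, d.getD x 0 + 1) else p) := by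
        simp only [PySem.Dict.modify]
        exact PySem.Dict.items_insert_of_contains d _ hc
      have hcont : ∀ k, (d.modify x 0 (· + 1)).contains k = (k == x || d.contains k) := by
        intro k; simp only [PySem.Dict.modify]; exact PySem.Dict.contains_insert d _ _ _
      have hfilter : (S.filter (fun k => !(d.modify x 0 (· + 1)).contains k))
          = S.filter (fun k => !d.contains k) := by
        apply List.filter_congr
        intro k hk
        have : k ≠ x := fun h => hx (h ▸ hk)
        simp [hcont, this]
      have hfilter2 : ((x :: S).filter (fun k => !d.contains k))
          = S.filter (fun k => !d.contains k) := by
        simp [hc]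
      rw [hitems, hfilter, hfilter2, List.map_map]
      congr 1
      apply List.map_congr_left
      intro p hp
      by_cases hpx : p.1 = x
      · have hp' : (x, p.2) ∈ d.items := by rw [← hpx]; exact hp
        have hv : d.getD x 0 = p.2 := PySem.Dict.getD_of_mem_items d hp' hd 0
        simp [Function.comp, hpx, hv, hx]
      · simp [Function.comp, hpx]
    · have hc' : d.contains x = false := by simp at hc; exact hc
      have hgv : d.getD x 0 = 0 := PySem.Dict.getD_of_not_contains d 0 hc'
      have hitems : (d.modify x 0 (· + 1)).items = d.items ++ [(x, (1 : Int))] := by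
        simp only [PySem.Dict.modify]
        rw [PySem.Dict.items_insert_of_not_contains d _ hc', hgv]
        norm_num
      have hcont : ∀ k, (d.modify x 0 (· + 1)).contains k = (k == x || d.contains k) := by
        intro k; simp only [PySem.Dict.modify]; exact PySem.Dict.contains_insert d _ _ _
      have hfilter : (S.filter (fun k => !(d.modify x 0 (· + 1)).contains k))
          = S.filter (fun k => !d.contains k) := by
        apply List.filter_congr
        intro k hk
        have : k ≠ x := fun h => hx (h ▸ hk)
        simp [hcont, this]
      have hkeyne : ∀ p ∈ d.items, p.1 ≠ x := by
        intro p hp h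
        have : p.1 ∈ d.keys := PySem.Dict.mem_keys_of_mem_items d hp
        rw [h] at this
        rw [← PySem.Dict.contains_iff_mem_keys] at this
        simp [hc'] at this
      rw [hitems, hfilter, List.map_append]
      have hmapeq : d.items.map (fun p => if p.1 ∈ S then (p.1, p.2 + 1) else p)
          = d.items.map (fun p => if p.1 ∈ x :: S then (p.1, p.2 + 1) else p) := by
        apply List.map_congr_left
        intro p hp
        have := hkeyne p hp
        simp [List.mem_cons, this]
      rw [hmapeq]
      simp [hx, hc', List.append_assoc]

lemma keys_countFold (S : List String) (d : PySem.Dict String Int)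
    (hS : S.Nodup) (hd : d.keys.Nodup) :
    (S.foldl (fun d c => d.modify c 0 (· + 1)) d).keys =
      d.keys ++ S.filter (fun k => !d.contains k) := by
  simp only [PySem.Dict.keys, items_countFold S d hS hd, List.map_append, List.map_map]
  congr 1
  · apply List.map_congr_left; intro p _; by_cases h : p.1 ∈ S <;> simp [h]
  · have : ((fun (x : String × Int) => x.1) ∘ fun k => (k, (1:Int))) = id := rfl
    rw [this, List.map_id]

lemma pvEmit_of_inv (w : Option (PySem.Set String)) (cnt : PySem.Dict String Int) (n : Int)
    (h : pvInv w cnt n) : pvEmitB cnt n = w.getD [] := by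
  obtain ⟨-, -, h3⟩ := h
  match w with
  | none =>
    obtain ⟨-, rfl⟩ := h3
    simp [pvEmitB, PySem.Dict.empty]
  | some w' =>
    exact h3.2.symm

lemma pvInv_step (w : Option (PySem.Set String)) (cnt : PySem.Dict String Int) (n : Int)
    (h : pvInv w cnt n) (line : String) (out : List (List String)) :
    (pvStepB (cnt, n, out) line).2.2 = (pvStepA (w, out) line).2 ∧
    pvInv (pvStepA (w, out) line).1 (pvStepB (cnt, n, out) line).1
      (pvStepB (cnt, n, out) line).2.1 := by
  obtain ⟨hkeys, hcount, hmatch⟩ := h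
  by_cases hblank : PySem.Str.strip line = ""
  · -- blank: both yield, reset
    simp only [pvStepA, pvStepB, hblank, reduceIte]
    refine ⟨by rw [pvEmit_of_inv w cnt n ⟨hkeys, hcount, hmatch⟩], ?_⟩
    refine ⟨by simp [PySem.Dict.keys, PySem.Dict.empty], ?_, rfl, rfl⟩
    intro p hp; simp [PySem.Dict.empty] at hp
  · -- non-blank
    simp only [pvStepA, pvStepB, if_neg hblank]
    set S := PySem.List.dedup (pvChars (PySem.Str.strip line)) with hSdef
    have hS : S.Nodup := PySem.List.nodup_dedup _
    have hitems := items_countFold S cnt hS hkeys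
    have hkeys' : ((S.foldl (fun d c => d.modify c 0 (· + 1)) cnt)).keys.Nodup := by
      rw [keys_countFold S cnt hS hkeys]
      rw [List.nodup_append]
      refine ⟨hkeys, hS.filter _, ?_⟩
      intro k hk b hb rfl
      have := List.of_mem_filter hb
      rw [← PySem.Dict.contains_iff_mem_keys] at hk
      simp [hk] at this
    have hcount' : 0 ≤ n → ∀ p ∈ (S.foldl (fun d c => d.modify c 0 (· + 1)) cnt).items,
        1 ≤ p.2 ∧ p.2 ≤ n + 1 := by
      intro hn0
      rw [hitems]
      intro p hp
      rcases List.mem_append.mp hp with hp | hp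
      · obtain ⟨q, hq, rfl⟩ := List.mem_map.mp hp
        have := hcount q hq
        by_cases hqs : q.1 ∈ S <;> simp [hqs] <;> omega
      · obtain ⟨k, -, rfl⟩ := List.mem_map.mp hp
        simp; omega
    have hS' : PySem.Set.ofList (pvChars (PySem.Str.strip line)) = S := by
      rw [hSdef, PySem.List.dedup_eq_ofList]
    rcases w with _ | w'
    · obtain ⟨hn, hcnt⟩ := hmatch
      subst hcnt hn
      refine ⟨rfl, hkeys', hcount' le_rfl, by norm_num, ?_⟩
      rw [hS']
      unfold pvEmitB
      rw [hitems]
      simp [PySem.Dict.empty, List.filter_map, Function.comp_def]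
    · obtain ⟨hn1, hw⟩ := hmatch
      refine ⟨rfl, hkeys', hcount' (by omega), by omega, ?_⟩
      rw [hS']
      unfold pvEmitB
      rw [hitems, List.filter_append, List.filter_map, List.filter_map]
      rw [hw]
      unfold pvEmitB
      have h2 : (List.filter ((fun p : String × Int => decide (p.2 = n + 1)) ∘ fun k => (k, (1:Int))) (List.filter (fun k => !cnt.contains k) S)) = [] := by
        apply List.filter_eq_nil_iff.mpr
        intro k hk
        simp [Function.comp_def]
        omega
      rw [h2]
      have h1 : List.filter ((fun p : String × Int => decide (p.2 = n + 1)) ∘ fun p : String × Int => if p.1 ∈ S then (p.1, p.2 + 1) else p) cnt.items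
          = List.filter (fun p : String × Int => decide (p.2 = n) && decide (p.1 ∈ S)) cnt.items := by
        apply List.filter_congr
        intro q hq
        have hb := hcount q hq
        by_cases hqs : q.1 ∈ S <;> simp [Function.comp_def, hqs] <;> omega
      rw [h1]
      simp only [List.map_nil, List.append_nil, List.map_map]
      have h3 : List.map ((fun p : String × Int => p.1) ∘ fun p : String × Int => if p.1 ∈ S then (p.1, p.2+1) else p) (List.filter (fun p : String × Int => decide (p.2 = n) && decide (p.1 ∈ S)) cnt.items) = List.map (fun p : String × Int => p.1) (List.filter (fun p : String × Int => decide (p.2 = n) && decide (p.1 ∈ S)) cnt.items) := by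
        apply List.map_congr_left; intro q hq
        have := (List.mem_filter.mp hq).2
        by_cases hqs : q.1 ∈ S <;> simp [Function.comp_def, hqs]
      rw [h3]
      simp only [PySem.Set.inter, List.filter_map, List.filter_filter]
      refine congrArg (List.map _) (List.filter_congr ?_)
      intro q _
      simp [Function.comp_def, Bool.and_comm]

lemma pvLoop (lines : List String) :
    ∀ (w : Option (PySem.Set String)) (cnt : PySem.Dict String Int) (n : Int)
      (out : List (List String)), pvInv w cnt n →
    (lines.foldl pvStepB (cnt, n, out)).2.2 = (lines.foldl pvStepA (w, out)).2 ∧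
    pvInv (lines.foldl pvStepA (w, out)).1 (lines.foldl pvStepB (cnt, n, out)).1
      (lines.foldl pvStepB (cnt, n, out)).2.1 := by
  induction lines with
  | nil => intro w cnt n out h; exact ⟨rfl, h⟩
  | cons l ls ih =>
    intro w cnt n out h
    obtain ⟨hout, hinv⟩ := pvInv_step w cnt n ⟨h.1, h.2.1, h.2.2⟩ l out
    simp only [List.foldl_cons]
    have hB : pvStepB (cnt, n, out) l
        = ((pvStepB (cnt, n, out) l).1, (pvStepB (cnt, n, out) l).2.1, (pvStepA (w, out) l).2) := by
      rw [← hout]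
    rw [hB]
    have hA : pvStepA (w, out) l = ((pvStepA (w, out) l).1, (pvStepA (w, out) l).2) := rfl
    rw [hA]
    exact ih _ _ _ _ hinv

-- ===== VERDICT (by name: the statement is the Claim_ definition above) =====
theorem ParseFilePart2_spec : Claim_equal_ParseFilePart2 := by
  intro lines _
  unfold Spec_ParseFilePart2 ParseFilePart2 ParseFilePart2_alt
  have h0 : pvInv none PySem.Dict.empty 0 := by
    refine ⟨by simp [PySem.Dict.keys, PySem.Dict.empty], ?_, rfl, rfl⟩
    intro p hp; simp [PySem.Dict.empty] at hp
  obtain ⟨hout, hinv⟩ := pvLoop lines none PySem.Dict.empty 0 [] h0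
  simp only [hout, pvEmit_of_inv _ _ _ hinv]
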